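-- pv_equiv track=rewrite | github.com/0xwhoami/Growtopia-Chemsynth-Router | chemsynth/chempoint.py | __point2
-- ===== SOURCE A (Python) =====
-- def __point2(list1, list2):
-- 	'''
-- 	this function is specific to centrifuge. basically it calculates
-- 	like __point1 does, but the centrifuge has various distances,
-- 	so the longer a list the bigger the points obtained.
-- 	'''
-- 	value = 0
-- 	length = len(list1)
-- 	half = 	length >> 1		# value // 2 == value >> 1
-- 	# calculating
-- 	for index in range(length):
-- 		if index < half:
-- 			value += half - index
-- 		else:
-- 			value += index - half + 1
--
-- 	return value
-- ===== SOURCE B (Python) =====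
-- def __point2(list1, list2):
--     # closed form: the loop adds half, half-1, ..., 1 for the first half
--     # and 1, 2, ..., length-half for the rest -> two triangular numbers
--     n = len(list1)
--     h = n >> 1
--     k = n - h
--     return h * (h + 1) // 2 + k * (k + 1) // 2
-- ===== Notes on version B (the rewrite author's own statement) =====
-- stated objective: faster
-- what changed: Replaced the O(n) loop over range(len(list1)) by a closed-form sum of two triangular numbers computed from the length alone.
import Mathlib
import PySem

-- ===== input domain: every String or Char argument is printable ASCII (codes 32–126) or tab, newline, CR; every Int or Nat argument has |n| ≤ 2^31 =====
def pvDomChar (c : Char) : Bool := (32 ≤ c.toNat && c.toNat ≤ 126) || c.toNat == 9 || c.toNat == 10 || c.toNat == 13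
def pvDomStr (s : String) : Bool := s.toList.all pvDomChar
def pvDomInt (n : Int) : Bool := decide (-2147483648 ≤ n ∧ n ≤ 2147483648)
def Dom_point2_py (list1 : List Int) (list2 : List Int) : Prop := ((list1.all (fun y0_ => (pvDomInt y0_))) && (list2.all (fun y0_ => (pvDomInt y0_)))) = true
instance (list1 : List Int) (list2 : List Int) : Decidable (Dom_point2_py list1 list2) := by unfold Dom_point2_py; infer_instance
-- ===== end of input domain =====

-- B replaces A's O(n) loop by a closed-form sum of two triangular numbers (objective: faster, asymptotic).


-- ===== PORT A =====
def point2_py (list1 : List Int) (_list2 : List Int) : Int :=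
  let length : Int := list1.length
  -- 'length >> 1': for the nonnegative 'length' this is exactly floor division by 2
  let half : Int := PySem.Int.floordiv length 2
  (PySem.List.pyRange 0 length 1).foldl
    (fun value index =>
      if index < half then value + (half - index) else value + (index - half + 1)) 0

-- ===== PORT B =====
def point2_py_alt (list1 : List Int) (_list2 : List Int) : Int :=
  let n : Int := list1.length
  let h : Int := PySem.Int.floordiv n 2   -- 'n >> 1': floor division by 2 for nonnegative n
  let k : Int := n - h
  PySem.Int.floordiv (h * (h + 1)) 2 + PySem.Int.floordiv (k * (k + 1)) 2

-- ===== PRECONDITION & SPEC =====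
def Spec_point2_py (list1 : List Int) (list2 : List Int) (out : Int) : Prop := out = point2_py_alt list1 list2
instance (list1 : List Int) (list2 : List Int) (out : Int) : Decidable (Spec_point2_py list1 list2 out) := by unfold Spec_point2_py; infer_instance

-- ===== CLAIM (what is proved, stated in full; the proofs are below) =====
def Claim_equal_point2_py : Prop := ∀ (list1 : List Int) (list2 : List Int), Dom_point2_py list1 list2 → Spec_point2_py list1 list2 (point2_py list1 list2)

-- ===== LEMMAS AND PROOFS =====

-- the partial sum of A's loop summands
def pvP (h : Int) (m : Nat) : Int :=
  ∑ i ∈ Finset.range m, (if (i : Int) < h then h - (i : Int) else (i : Int) - h + 1)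

theorem pvFold_eq (h : Int) (m : Nat) (acc : Int) :
    (PySem.List.pyRange 0 (m : Int) 1).foldl
      (fun value index =>
        if index < h then value + (h - index) else value + (index - h + 1)) acc
    = acc + pvP h m := by
  induction m generalizing acc with
  | zero => simp [pvP]
  | succ m ih =>
    have hsplit : PySem.List.pyRange 0 ((m : Int) + 1) 1
        = PySem.List.pyRange 0 (m : Int) 1 ++ [(m : Int)] :=
      PySem.List.pyRange_one_succ_right (by omega)
    rw [show ((m + 1 : Nat) : Int) = (m : Int) + 1 by push_cast; ring, hsplit,
      List.foldl_append, ih]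
    simp only [List.foldl_cons, List.foldl_nil, pvP, Finset.sum_range_succ]
    split <;> ring

theorem pvP_closed (h : Int) (m : Nat) (h0 : 0 ≤ h) :
    2 * pvP h m
    = if (m : Int) ≤ h then (2 * h - m + 1) * m
      else h * (h + 1) + ((m : Int) - h) * ((m : Int) - h + 1) := by
  induction m with
  | zero => simp [pvP, h0]
  | succ m ih =>
    rw [pvP, Finset.sum_range_succ, ← pvP]
    push_cast
    by_cases h1 : ((m : Int) + 1) ≤ h
    · rw [if_pos h1]
      rw [if_pos (by omega)] at ih
      rw [if_pos (by omega)]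
      linarith [ih]
    · rw [if_neg h1]
      by_cases h2 : (m : Int) ≤ h
      · have hm : h = (m : Int) := by omega
        rw [if_pos h2] at ih
        rw [if_neg (by omega)]
        subst hm
        linarith [ih]
      · rw [if_neg h2] at ih
        rw [if_neg (by omega)]
        linarith [ih]

theorem pvFloordiv_tri (x : Int) : PySem.Int.floordiv (x * (x + 1)) 2 * 2 = x * (x + 1) := by
  obtain ⟨r, hr⟩ := Int.even_mul_succ_self x
  rw [PySem.Int.floordiv_eq_ediv_of_pos (by omega), hr,
    show r + r = 2 * r by ring, Int.mul_ediv_cancel_left _ (by omega)]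
  ring

-- ===== VERDICT (by name: the statement is the Claim_ definition above) =====
theorem point2_py_spec : Claim_equal_point2_py := by
  intro list1 list2 _
  show _ = _
  unfold point2_py point2_py_alt
  simp only []
  set n : Nat := list1.length with hn
  have hhalf : PySem.Int.floordiv (n : Int) 2 = ((n / 2 : Nat) : Int) := by
    exact_mod_cast PySem.Int.floordiv_natCast n 2
  rw [hhalf, pvFold_eq ((n / 2 : Nat) : Int) n 0, zero_add]
  have hP := pvP_closed ((n / 2 : Nat) : Int) n (by positivity)
  have t1 := pvFloordiv_tri ((n / 2 : Nat) : Int)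
  have t2 := pvFloordiv_tri ((n : Int) - ((n / 2 : Nat) : Int))
  have hdiv : 2 * ((n / 2 : Nat) : Int) ≤ (n : Int) ∧ (n : Int) ≤ 2 * ((n / 2 : Nat) : Int) + 1 := by
    constructor <;> omega
  by_cases hc : ((n : Int)) ≤ ((n / 2 : Nat) : Int)
  · have hn0 : n = 0 := by omega
    rw [if_pos hc] at hP
    rw [hn0] at hP ⊢
    norm_num [pvP] at hP ⊢
  · rw [if_neg hc] at hP
    nlinarith [hP, t1, t2]
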